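-- pv_equiv track=rewrite | github.com/MatiasAGomezJ/codigo-python | 1/Negative_Connotation.py | connotation
-- ===== SOURCE A (Python) =====
-- def connotation(string):
--     string = string.lower()
--     string = string.split()
--     a = 0
--     n = 0
--     for i in string:
--         if ord('a') <= ord(i[0]) <= ord('m'):
--             a += 1
--         elif ord('n') <= ord(i[0]) <= ord('z'):
--             n += 1
--     if a >= n:
--         return True
--     else:
--         return False
-- ===== SOURCE B (Python) =====
-- def connotation(string):
--     firsts = ''.join(w[0] for w in string.lower().split())
--     a = sum(firsts.count(c) for c in 'abcdefghijklm')
--     n = sum(firsts.count(c) for c in 'nopqrstuvwxyz')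
--     return a >= n
-- ===== Notes on version B (the rewrite author's own statement) =====
-- stated objective: alternative
-- what changed: Instead of A's single word scan with range branches updating two running tallies, B first materialises the string of first letters via join, then runs an outer loop over the 26 alphabet letters, using str.count to count each letter's occurrences and summing the two half-alphabet totals.
import Mathlib
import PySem

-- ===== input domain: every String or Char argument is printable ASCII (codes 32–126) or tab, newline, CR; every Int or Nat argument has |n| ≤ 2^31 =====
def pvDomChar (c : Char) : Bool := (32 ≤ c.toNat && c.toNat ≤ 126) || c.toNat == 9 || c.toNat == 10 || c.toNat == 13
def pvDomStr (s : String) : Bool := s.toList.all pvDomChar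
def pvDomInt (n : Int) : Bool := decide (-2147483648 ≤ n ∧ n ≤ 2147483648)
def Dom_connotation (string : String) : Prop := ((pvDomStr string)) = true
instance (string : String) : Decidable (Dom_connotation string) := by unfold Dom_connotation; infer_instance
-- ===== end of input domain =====

-- B extracts the string of first letters once and then runs one counting scan per alphabet letter ('a'..'m' vs 'n'..'z'); A keeps two running tallies with range branches in one word scan (alternative decomposition, same cost).

-- ===== PORT A =====
-- A's loop body: bump the a-tally, the n-tally, or neither, from the word's first character
def pvStepA (an : Int × Int) (i : String) : Int × Int :=
  match PySem.Str.pyGet? i 0 with   -- i[0]; split() words are nonempty, none is unreachable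
  | some c =>
    if 97 ≤ c.toNat ∧ c.toNat ≤ 109 then (an.1 + 1, an.2)
    else if 110 ≤ c.toNat ∧ c.toNat ≤ 122 then (an.1, an.2 + 1)
    else an
  | none => an

-- one scan over the words, two running tallies, branch order as in A
def connotation (string : String) : Bool :=
  let words := PySem.Str.split₀ (PySem.Str.lower string)
  let an := words.foldl pvStepA ((0 : Int), (0 : Int))
  if an.1 ≥ an.2 then true else false

-- ===== PORT B =====
-- ''.join(w[0] for w in …) kept as a List Char; str.count with a one-character needle = List.count (exact here)
def connotation_alt (string : String) : Bool :=
  let firsts := (PySem.Str.split₀ (PySem.Str.lower string)).filterMap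
    (fun w => PySem.Str.pyGet? w 0)   -- w[0]; split() words are nonempty, none is unreachable
  let a := ("abcdefghijklm".toList.map (fun c => (firsts.count c : Int))).sum
  let n := ("nopqrstuvwxyz".toList.map (fun c => (firsts.count c : Int))).sum
  a ≥ n

-- ===== PRECONDITION & SPEC =====
def Spec_connotation (string : String) (out : Bool) : Prop := out = connotation_alt string
instance (string : String) (out : Bool) : Decidable (Spec_connotation string out) := by unfold Spec_connotation; infer_instance

-- ===== CLAIM (what is proved, stated in full; the proofs are below) =====
def Claim_equal_connotation : Prop := ∀ (string : String), Dom_connotation string → Spec_connotation string (connotation string)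

-- ===== LEMMAS AND PROOFS =====

-- first characters of the words (as actually consumed by both programs)
def pvFirsts (ws : List String) : List Char := ws.filterMap (fun w => PySem.Str.pyGet? w 0)

theorem pvFirsts_cons_none {w : String} (ws : List String)
    (h : PySem.Str.pyGet? w 0 = none) : pvFirsts (w :: ws) = pvFirsts ws := by
  simp [pvFirsts, List.filterMap_cons, show PySem.List.pyGet? w.toList 0 = none from h]

theorem pvFirsts_cons_some {w : String} {c : Char} (ws : List String)
    (h : PySem.Str.pyGet? w 0 = some c) : pvFirsts (w :: ws) = c :: pvFirsts ws := by
  simp [pvFirsts, List.filterMap_cons, show PySem.List.pyGet? w.toList 0 = some c from h]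

theorem pvA_loop (ws : List String) (a n : Int) :
    ws.foldl pvStepA (a, n)
    = (a + ((pvFirsts ws).countP (fun c => 97 ≤ c.toNat && c.toNat ≤ 109) : Int),
       n + ((pvFirsts ws).countP (fun c => 110 ≤ c.toNat && c.toNat ≤ 122) : Int)) := by
  induction ws generalizing a n with
  | nil => simp [pvFirsts]
  | cons w ws ih =>
    rw [List.foldl_cons]
    cases h : PySem.Str.pyGet? w 0 with
    | none =>
      rw [show pvStepA (a, n) w = (a, n) from by unfold pvStepA; rw [h], ih,
        pvFirsts_cons_none ws h]
    | some c =>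
      rw [pvFirsts_cons_some ws h]
      by_cases h1 : 97 ≤ c.toNat ∧ c.toNat ≤ 109
      · rw [show pvStepA (a, n) w = (a + 1, n) from by unfold pvStepA; rw [h]; simp [h1], ih]
        simp only [List.countP_cons, Prod.mk.injEq]
        refine ⟨?_, ?_⟩ <;>
          (split_ifs with hh <;>
            (simp only [Bool.and_eq_true, decide_eq_true_eq] at hh <;> push_cast <;> omega))
      · by_cases h2 : 110 ≤ c.toNat ∧ c.toNat ≤ 122
        · rw [show pvStepA (a, n) w = (a, n + 1) from by
            unfold pvStepA; rw [h]; simp [h1, h2], ih]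
          simp only [List.countP_cons, Prod.mk.injEq]
          refine ⟨?_, ?_⟩ <;>
            (split_ifs with hh <;>
              (simp only [Bool.and_eq_true, decide_eq_true_eq] at hh <;> push_cast <;> omega))
        · rw [show pvStepA (a, n) w = (a, n) from by
            unfold pvStepA; rw [h]; simp [h1, h2], ih]
          simp only [List.countP_cons, Prod.mk.injEq]
          refine ⟨?_, ?_⟩ <;>
            (split_ifs with hh <;>
              (simp only [Bool.and_eq_true, decide_eq_true_eq] at hh <;> push_cast <;> omega))

theorem pvChar_toNat_inj {a b : Char} (h : a.toNat = b.toNat) : a = b :=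
  Char.ext (UInt32.toNat_inj.mp h)

-- the indicator sum over a duplicate-free key list
theorem pvIndSum (x : Char) (L : List Char) (hnd : L.Nodup) :
    (L.map (fun k => (if k = x then (1 : Int) else 0))).sum = if x ∈ L then 1 else 0 := by
  induction L with
  | nil => simp
  | cons k L ih =>
    have hk : k ∉ L := (List.nodup_cons.1 hnd).1
    have ih' := ih (List.nodup_cons.1 hnd).2
    by_cases hx : k = x
    · subst hx; simp [ih', hk]
    · have hxk : ¬x = k := fun h => hx h.symm
      simp [hx, hxk, ih']

-- sum of per-key counting scans over the distinct keys satisfying p = number of elements satisfying p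
theorem pvSumCounts (L : List Char) (p : Char → Bool) (hnd : L.Nodup)
    (hmem : ∀ x, x ∈ L ↔ p x = true) (cs : List Char) :
    (L.map (fun k => (cs.count k : Int))).sum = (cs.countP p : Int) := by
  induction cs with
  | nil => simp
  | cons x cs ih =>
    have hcnt : L.map (fun k => (((x :: cs).count k : Nat) : Int))
        = L.map (fun k => (cs.count k : Int) + (if k = x then 1 else 0)) := by
      apply List.map_congr_left
      intro k _
      rcases eq_or_ne k x with h | h
      · subst h; simp [List.count_cons]
      · have h' : ¬x = k := fun hh => h hh.symm
        simp [List.count_cons, h, h']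
    rw [hcnt, List.sum_map_add, ih, pvIndSum x L hnd, List.countP_cons]
    by_cases hx : p x = true
    · have hm : x ∈ L := (hmem x).2 hx
      simp only [hx, hm, if_true]
      push_cast; ring
    · have hm : x ∉ L := fun h => hx ((hmem x).1 h)
      simp [hx, hm]

-- membership in a char list ↔ membership of the code in the mapped list
theorem pvMemIffNat (x : Char) (L : List Char) : x ∈ L ↔ x.toNat ∈ L.map Char.toNat := by
  constructor
  · exact fun h => List.mem_map_of_mem h
  · intro h
    rcases List.mem_map.1 h with ⟨c, hc, hce⟩
    rw [← pvChar_toNat_inj hce]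
    exact hc

theorem pvMemAM (x : Char) :
    x ∈ "abcdefghijklm".toList ↔ (97 ≤ x.toNat && x.toNat ≤ 109) = true := by
  rw [pvMemIffNat]
  simp only [show ("abcdefghijklm".toList.map Char.toNat)
      = [97, 98, 99, 100, 101, 102, 103, 104, 105, 106, 107, 108, 109] from by decide,
    List.mem_cons, List.not_mem_nil, or_false, Bool.and_eq_true, decide_eq_true_eq]
  omega

theorem pvMemNZ (x : Char) :
    x ∈ "nopqrstuvwxyz".toList ↔ (110 ≤ x.toNat && x.toNat ≤ 122) = true := by
  rw [pvMemIffNat]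
  simp only [show ("nopqrstuvwxyz".toList.map Char.toNat)
      = [110, 111, 112, 113, 114, 115, 116, 117, 118, 119, 120, 121, 122] from by decide,
    List.mem_cons, List.not_mem_nil, or_false, Bool.and_eq_true, decide_eq_true_eq]
  omega

-- ===== VERDICT (by name: the statement is the Claim_ definition above) =====
theorem connotation_spec : Claim_equal_connotation := by
  intro s _
  show connotation s = connotation_alt s
  simp only [connotation, connotation_alt]
  rw [pvA_loop,
    pvSumCounts _ _ (by decide) pvMemAM,
    pvSumCounts _ _ (by decide) pvMemNZ]
  simp [pvFirsts, ge_iff_le]
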